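-- pv_equiv track=rewrite | github.com/warnj/interview_practice_py | premium.py | isValidPalindromeIdeal
-- ===== SOURCE A (Python) =====
-- def isValidPalindromeIdeal(s: str, k: int) -> bool:
--     n = len(s)
--     memo = [0] * n
--     for i in range(n - 2, -1, -1):
--         prev = 0
--         for j in range(i + 1, n):
--             temp = memo[j]
--             if s[i] == s[j]:
--                 memo[j] = prev
--             else:
--                 memo[j] = 1 + min(memo[j], memo[j - 1])
--             prev = temp
--     return memo[n - 1] <= k
-- ===== SOURCE B (Python) =====
-- def isValidPalindromeIdeal(s: str, k: int) -> bool: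
--     # Breadth-first shortest-path search over shrunken index intervals: level d holds the
--     # intervals reachable with d deletions; succeed as soon as some interval's length fits
--     # the remaining budget (deleting all but one character always leaves a palindrome).
--     n = len(s)
--     def shrink(i, j):
--         while i < j and s[i] == s[j]:
--             i, j = i + 1, j - 1
--         return (i, j)
--     start = shrink(0, n - 1)
--     frontier, seen = [start], {start}
--     d = 0
--     while d <= k:
--         if any(j - i + d <= k for (i, j) in frontier):
--             return True
--         nxt = []
--         for (i, j) in frontier:
--             for u in (shrink(i + 1, j), shrink(i, j - 1)):
--                 if u not in seen:
--                     seen.add(u)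
--                     nxt.append(u)
--         frontier = nxt
--         d += 1
--     return False
-- ===== Notes on version B (the rewrite author's own statement) =====
-- stated objective: alternative
-- what changed: Replaces A's dense O(n^2) table DP (rolling array, every (i,j) state filled) by a breadth-first shortest-path search over shrunken index intervals: frontiers grow by one deletion per level with a visited set, succeeding as soon as some interval's length fits the remaining budget.
import Mathlib
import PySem

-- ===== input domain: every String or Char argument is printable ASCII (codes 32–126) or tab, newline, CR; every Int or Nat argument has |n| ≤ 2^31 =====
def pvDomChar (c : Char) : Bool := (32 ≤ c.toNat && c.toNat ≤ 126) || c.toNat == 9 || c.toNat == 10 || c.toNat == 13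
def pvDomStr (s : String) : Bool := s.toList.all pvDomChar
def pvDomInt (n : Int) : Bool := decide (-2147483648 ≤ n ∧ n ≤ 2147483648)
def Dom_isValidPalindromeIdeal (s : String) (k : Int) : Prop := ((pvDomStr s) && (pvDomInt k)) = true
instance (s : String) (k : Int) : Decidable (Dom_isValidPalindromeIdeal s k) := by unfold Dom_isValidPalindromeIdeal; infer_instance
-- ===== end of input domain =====

-- B replaces A's dense table DP by a breadth-first shortest-path search over shrunken index
-- intervals (frontier + visited set, early exit once an interval collapses within the budget);
-- objective: alternative.

-- ===== PORT A =====
-- inner loop `for j in range(i+1, n)` of A; `c` = number of remaining iterations (n - j).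
-- All list/char accesses in the executed loops are in range, so `getD`/`set` are exact here.
def aRow (cs : List Char) (i : Nat) (memo : List Int) (prev : Int) (j : Nat) : Nat → List Int
  | 0 => memo
  | c + 1 =>
    aRow cs i
      (if cs.getD i ' ' = cs.getD j ' ' then memo.set j prev
        else memo.set j (1 + min (memo.getD j 0) (memo.getD (j - 1) 0)))
      (memo.getD j 0) (j + 1) c

-- outer loop `for i in range(n-2, -1, -1)`: `aOuter … c` runs rows i = c-1, c-2, …, 0.
def aOuter (cs : List Char) (n : Nat) (memo : List Int) : Nat → List Int
  | 0 => memo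
  | c + 1 => aOuter cs n (aRow cs c memo 0 (c + 1) (n - (c + 1))) c

def isValidPalindromeIdeal (s : String) (k : Int) : Bool :=
  let cs := s.toList
  let n := cs.length
  let memo := aOuter cs n (List.replicate n 0) (n - 1)
  decide (memo.getD (n - 1) 0 ≤ k)

-- ===== PORT B =====
-- `shrink`: drop matching end characters while the interval is proper (indices stay in range
-- inside Pre_, so `getD` is exact there).
def bShrink (cs : List Char) (i j : Nat) : Nat × Nat :=
  if i < j ∧ cs.getD i ' ' = cs.getD j ' ' then bShrink cs (i + 1) (j - 1) else (i, j)
termination_by j - i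
decreasing_by omega

-- `if u not in seen: seen.add(u); nxt.append(u)` — seen is a Python set used only for
-- membership, so a cons list with the same members is exact.
def bAdd (acc : List (Nat × Nat) × List (Nat × Nat)) (u : Nat × Nat) :
    List (Nat × Nat) × List (Nat × Nat) :=
  if u ∈ acc.2 then acc else (acc.1 ++ [u], u :: acc.2)

-- the `for (i, j) in frontier: for u in (shrink(i+1,j), shrink(i,j-1)): …` expansion
def bStep (cs : List Char) (F : List (Nat × Nat)) (seen : List (Nat × Nat)) :
    List (Nat × Nat) × List (Nat × Nat) :=
  F.foldl (fun acc p => bAdd (bAdd acc (bShrink cs (p.1 + 1) p.2)) (bShrink cs p.1 (p.2 - 1)))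
    ([], seen)

-- `while d <= k:` loop; fuel n+1 suffices (the minimum deletion count is < n, proved below).
def bLoop (cs : List Char) (k : Int) : List (Nat × Nat) → List (Nat × Nat) → Int → Nat → Bool
  | _, _, _, 0 => false
  | F, seen, d, f + 1 =>
    if d ≤ k then
      if F.any (fun u => (u.2 : Int) - (u.1 : Int) + d ≤ k) then true
      else
        let acc := bStep cs F seen
        bLoop cs k acc.1 acc.2 (d + 1) f
    else false

def isValidPalindromeIdeal_alt (s : String) (k : Int) : Bool :=
  let cs := s.toList
  let n := cs.length
  let start := bShrink cs 0 (n - 1)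
  bLoop cs k [start] [start] 0 (n + 1)

-- ===== PRECONDITION & SPEC =====
-- Pre_ excludes only the empty string, on which Python A raises IndexError (memo[-1] on []).
def Pre_isValidPalindromeIdeal (s : String) (k : Int) : Prop := s.toList ≠ []
instance (s : String) (k : Int) : Decidable (Pre_isValidPalindromeIdeal s k) := by
  unfold Pre_isValidPalindromeIdeal; infer_instance

def pvWitness_isValidPalindromeIdeal : String × Int := ("aba", 0)

def Spec_isValidPalindromeIdeal (s : String) (k : Int) (out : Bool) : Prop := out = isValidPalindromeIdeal_alt s k
instance (s : String) (k : Int) (out : Bool) : Decidable (Spec_isValidPalindromeIdeal s k out) := by unfold Spec_isValidPalindromeIdeal; infer_instance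

-- ===== CLAIM (what is proved, stated in full; the proofs are below) =====
def Claim_equal_isValidPalindromeIdeal : Prop := ∀ (s : String) (k : Int), Dom_isValidPalindromeIdeal s k → Pre_isValidPalindromeIdeal s k → Spec_isValidPalindromeIdeal s k (isValidPalindromeIdeal s k)

-- ===== LEMMAS AND PROOFS =====

-- minimum number of deletions turning cs[i..j] into a palindrome (the common recurrence)
def dSpec (cs : List Char) (i j : Nat) : Int :=
  if _h : i < j then
    if cs.getD i ' ' = cs.getD j ' ' then dSpec cs (i + 1) (j - 1)
    else 1 + min (dSpec cs (i + 1) j) (dSpec cs i (j - 1))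
  else 0
termination_by j - i
decreasing_by all_goals omega

lemma dSpec_le (cs : List Char) {i j : Nat} (h : j ≤ i) : dSpec cs i j = 0 := by
  rw [dSpec]; simp [Nat.not_lt.mpr h]

lemma getD_set {α : Type} (l : List α) (d : α) (j : Nat) (v : α) (t : Nat) (hj : j < l.length) :
    (l.set j v).getD t d = if t = j then v else l.getD t d := by
  by_cases h : t = j <;>
    simp [List.getD_eq_getElem?_getD, h, hj, Ne.symm]

lemma getD_replicate {α : Type} (d x : α) {n t : Nat} (h : t < n) :
    (List.replicate n x).getD t d = x := by
  simp [List.getD_eq_getElem?_getD, h]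

lemma aRow_spec (cs : List Char) (n i : Nat) :
    ∀ (c j : Nat) (memo : List Int) (prev : Int),
      memo.length = n → i < j → j + c = n →
      prev = dSpec cs (i + 1) (j - 1) →
      (∀ t, t < n → memo.getD t 0 = if t < j then dSpec cs i t else dSpec cs (i + 1) t) →
      (aRow cs i memo prev j c).length = n ∧
        ∀ t, t < n → (aRow cs i memo prev j c).getD t 0 = dSpec cs i t := by
  intro c
  induction c with
  | zero =>
    intro j memo prev hlen hij hjc _ hinv
    refine ⟨hlen, fun t ht => ?_⟩
    rw [aRow, hinv t ht, if_pos (by omega)]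
  | succ c ih =>
    intro j memo prev hlen hij hjc hprev hinv
    have hjn : j < n := by omega
    have hmemoj : memo.getD j 0 = dSpec cs (i + 1) j := by
      rw [hinv j hjn, if_neg (by omega)]
    have hmemoj1 : memo.getD (j - 1) 0 = dSpec cs i (j - 1) := by
      rw [hinv (j - 1) (by omega), if_pos (by omega)]
    have hval : (if cs.getD i ' ' = cs.getD j ' ' then prev
        else 1 + min (memo.getD j 0) (memo.getD (j - 1) 0)) = dSpec cs i j := by
      rw [dSpec.eq_1 cs i j, dif_pos hij]
      split_ifs with hc
      · rw [hprev]
      · rw [hmemoj, hmemoj1]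
    have hset : (if cs.getD i ' ' = cs.getD j ' ' then memo.set j prev
        else memo.set j (1 + min (memo.getD j 0) (memo.getD (j - 1) 0))) =
        memo.set j (dSpec cs i j) := by
      rw [← hval]; split_ifs <;> rfl
    rw [aRow, hset]
    refine ih (j + 1) (memo.set j (dSpec cs i j)) (memo.getD j 0)
      (by simpa using hlen) (by omega) (by omega)
      (by simpa using hmemoj) ?_
    intro t ht
    rw [getD_set _ _ _ _ _ (by omega)]
    by_cases h : t = j
    · subst h; rw [if_pos rfl, if_pos (by omega)]
    · rw [if_neg h, hinv t ht]
      by_cases h2 : t < j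
      · rw [if_pos h2, if_pos (by omega)]
      · rw [if_neg h2, if_neg (by omega)]

lemma aOuter_spec (cs : List Char) (n : Nat) :
    ∀ (c : Nat) (memo : List Int),
      memo.length = n → c ≤ n →
      (∀ t, t < n → memo.getD t 0 = dSpec cs c t) →
      (aOuter cs n memo c).length = n ∧
        ∀ t, t < n → (aOuter cs n memo c).getD t 0 = dSpec cs 0 t := by
  intro c
  induction c with
  | zero => intro memo hlen _ hinv; exact ⟨hlen, fun t ht => by rw [aOuter, hinv t ht]⟩
  | succ c ih =>
    intro memo hlen hcn hinv
    rw [aOuter]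
    obtain ⟨hlen', hinv'⟩ := aRow_spec cs n c (n - (c + 1)) (c + 1) memo 0 hlen (by omega)
      (by omega)
      (by rw [dSpec_le cs (by omega)])
      (by
        intro t ht
        rw [hinv t ht]
        by_cases h : t < c + 1
        · rw [if_pos h, dSpec_le cs (by omega), dSpec_le cs (by omega)]
        · rw [if_neg h])
    exact ih _ hlen' (by omega) hinv'

lemma a_eval (cs : List Char) (hne : cs ≠ []) (k : Int) :
    (let n := cs.length
     decide ((aOuter cs n (List.replicate n 0) (n - 1)).getD (n - 1) 0 ≤ k)) =
    decide (dSpec cs 0 (cs.length - 1) ≤ k) := by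
  have hn : 0 < cs.length := List.length_pos_iff.mpr hne
  obtain ⟨_, h⟩ := aOuter_spec cs cs.length (cs.length - 1) (List.replicate cs.length 0)
    (by simp) (by omega)
    (fun t ht => by rw [getD_replicate _ _ ht, dSpec_le cs (by omega)])
  simp only []
  rw [h (cs.length - 1) (by omega)]

-- B side ------------------------------------------------------------------

lemma dSpec_nonneg (cs : List Char) : ∀ (d i j : Nat), j - i ≤ d → 0 ≤ dSpec cs i j := by
  intro d
  induction d with
  | zero => intro i j h; rw [dSpec_le cs (by omega)]
  | succ d ih =>
    intro i j h
    rw [dSpec.eq_1]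
    split_ifs with h1 h2
    · exact ih _ _ (by omega)
    · have := ih (i + 1) j (by omega)
      have := ih i (j - 1) (by omega)
      omega
    · rfl

lemma dSpec_span (cs : List Char) : ∀ (d i j : Nat), j - i ≤ d → dSpec cs i j ≤ ((j - i : Nat) : Int) := by
  intro d
  induction d with
  | zero => intro i j h; rw [dSpec_le cs (by omega)]; positivity
  | succ d ih =>
    intro i j h
    rw [dSpec.eq_1]
    split_ifs with h1 h2
    · have := ih (i + 1) (j - 1) (by omega)
      have : ((j - 1 - (i + 1) : Nat) : Int) ≤ ((j - i : Nat) : Int) := by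
        push_cast; omega
      omega
    · have := ih (i + 1) j (by omega)
      have h3 : ((j - (i + 1) : Nat) : Int) + 1 = ((j - i : Nat) : Int) := by
        push_cast; omega
      omega
    · positivity

def Shrunk (cs : List Char) (u : Nat × Nat) : Prop :=
  ¬ (u.1 < u.2 ∧ cs.getD u.1 ' ' = cs.getD u.2 ' ')

lemma bShrink_shrunk (cs : List Char) (i j : Nat) : Shrunk cs (bShrink cs i j) := by
  rw [bShrink]
  split_ifs with h
  · exact bShrink_shrunk cs (i + 1) (j - 1)
  · exact h
termination_by j - i
decreasing_by omega

lemma bShrink_dSpec (cs : List Char) (i j : Nat) :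
    dSpec cs (bShrink cs i j).1 (bShrink cs i j).2 = dSpec cs i j := by
  rw [bShrink]
  split_ifs with h
  · rw [bShrink_dSpec cs (i + 1) (j - 1), dSpec.eq_1 cs i j, dif_pos h.1, if_pos h.2]
  · rfl
termination_by j - i
decreasing_by omega

-- a shrunk interval has deletion cost 0 exactly when it has collapsed
lemma shrunk_zero_iff (cs : List Char) (u : Nat × Nat) (hs : Shrunk cs u) :
    dSpec cs u.1 u.2 = 0 ↔ u.2 ≤ u.1 := by
  constructor
  · intro h0
    by_contra hlt
    have hlt : u.1 < u.2 := by omega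
    have hne : ¬ cs.getD u.1 ' ' = cs.getD u.2 ' ' := fun hc => hs ⟨hlt, hc⟩
    rw [dSpec.eq_1, dif_pos hlt, if_neg hne] at h0
    have h1 := dSpec_nonneg cs (u.2 - (u.1 + 1)) (u.1 + 1) u.2 le_rfl
    have h2 := dSpec_nonneg cs (u.2 - 1 - u.1) u.1 (u.2 - 1) le_rfl
    omega
  · intro h; exact dSpec_le cs h

lemma bAdd_mono (acc : List (Nat × Nat) × List (Nat × Nat)) (u x : Nat × Nat)
    (h : x ∈ acc.1) : x ∈ (bAdd acc u).1 := by
  unfold bAdd; split_ifs <;> simp [h]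

lemma bAdd_sub (acc : List (Nat × Nat) × List (Nat × Nat)) (u x : Nat × Nat)
    (h : x ∈ (bAdd acc u).1) : x ∈ acc.1 ∨ x = u := by
  unfold bAdd at h
  split_ifs at h
  · exact Or.inl h
  · simpa using h

lemma bAdd_sync (seen0 : List (Nat × Nat)) (acc : List (Nat × Nat) × List (Nat × Nat))
    (u : Nat × Nat) (h : ∀ x, x ∈ acc.2 ↔ x ∈ seen0 ∨ x ∈ acc.1) :
    ∀ x, x ∈ (bAdd acc u).2 ↔ x ∈ seen0 ∨ x ∈ (bAdd acc u).1 := by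
  intro x
  unfold bAdd
  split_ifs with hm
  · exact h x
  · simp only [List.mem_cons, List.mem_append, List.mem_singleton, h x]
    tauto

lemma bAdd_cover (seen0 : List (Nat × Nat)) (acc : List (Nat × Nat) × List (Nat × Nat))
    (u : Nat × Nat) (h : ∀ x, x ∈ acc.2 ↔ x ∈ seen0 ∨ x ∈ acc.1) :
    u ∈ (bAdd acc u).1 ∨ u ∈ seen0 := by
  unfold bAdd
  split_ifs with hm
  · rcases (h u).mp hm with h1 | h1
    · exact Or.inr h1
    · exact Or.inl h1
  · left; simp

lemma bStep_fold (cs : List Char) (seen0 : List (Nat × Nat)) :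
    ∀ (F : List (Nat × Nat)) (acc : List (Nat × Nat) × List (Nat × Nat)),
      (∀ x, x ∈ acc.2 ↔ x ∈ seen0 ∨ x ∈ acc.1) →
      let r := F.foldl (fun acc p =>
        bAdd (bAdd acc (bShrink cs (p.1 + 1) p.2)) (bShrink cs p.1 (p.2 - 1))) acc
      (∀ x, x ∈ acc.1 → x ∈ r.1) ∧
      (∀ x, x ∈ r.2 ↔ x ∈ seen0 ∨ x ∈ r.1) ∧
      (∀ v, v ∈ r.1 → v ∈ acc.1 ∨ ∃ p ∈ F, v = bShrink cs (p.1 + 1) p.2 ∨ v = bShrink cs p.1 (p.2 - 1)) ∧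
      (∀ p ∈ F, (bShrink cs (p.1 + 1) p.2 ∈ r.1 ∨ bShrink cs (p.1 + 1) p.2 ∈ seen0) ∧
                (bShrink cs p.1 (p.2 - 1) ∈ r.1 ∨ bShrink cs p.1 (p.2 - 1) ∈ seen0)) := by
  intro F
  induction F with
  | nil =>
    intro acc hsync
    exact ⟨fun x hx => hx, hsync, fun v hv => Or.inl hv, fun p hp => absurd hp (by simp)⟩
  | cons q F ih =>
    intro acc hsync
    set u1 := bShrink cs (q.1 + 1) q.2 with hu1
    set u2 := bShrink cs q.1 (q.2 - 1) with hu2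
    set acc1 := bAdd (bAdd acc u1) u2 with hacc1
    have hsync1 : ∀ x, x ∈ acc1.2 ↔ x ∈ seen0 ∨ x ∈ acc1.1 :=
      bAdd_sync seen0 _ u2 (bAdd_sync seen0 acc u1 hsync)
    obtain ⟨hmono, hsync', hsub, hcover⟩ := ih acc1 hsync1
    simp only [List.foldl_cons]
    refine ⟨fun x hx => hmono x (bAdd_mono _ _ _ (bAdd_mono _ _ _ hx)), hsync', ?_, ?_⟩
    · intro v hv
      rcases hsub v hv with hv1 | ⟨p, hp, hc⟩
      · rcases bAdd_sub _ _ _ hv1 with hv2 | hv2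
        · rcases bAdd_sub _ _ _ hv2 with hv3 | hv3
          · exact Or.inl hv3
          · exact Or.inr ⟨q, by simp, Or.inl hv3⟩
        · exact Or.inr ⟨q, by simp, Or.inr hv2⟩
      · exact Or.inr ⟨p, by simp [hp], hc⟩
    · intro p hp
      rcases List.mem_cons.mp hp with rfl | hp
      · constructor
        · rcases bAdd_cover seen0 acc u1 hsync with h | h
          · exact Or.inl (hmono _ (bAdd_mono _ _ _ h))
          · exact Or.inr h
        · rcases bAdd_cover seen0 (bAdd acc u1) u2 (bAdd_sync seen0 acc u1 hsync) with h | h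
          · exact Or.inl (hmono _ h)
          · exact Or.inr h
      · exact hcover p hp

lemma bLoop_spec (cs : List Char) (k m : Int) :
    ∀ (f c : Nat) (F seen : List (Nat × Nat)),
      (c : Int) ≤ m → m + 1 ≤ (f : Int) + c →
      (∀ u ∈ F, Shrunk cs u ∧ m ≤ dSpec cs u.1 u.2 + c) →
      (∃ u ∈ F, dSpec cs u.1 u.2 + (c : Int) = m) →
      (∀ v ∈ seen, m ≤ dSpec cs v.1 v.2 + c) →
      bLoop cs k F seen (c : Int) f = decide (m ≤ k) := by
  intro f
  induction f with
  | zero => intro c F seen hcm hfuel _ _ _; exfalso; push_cast at hfuel; omega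
  | succ f ih =>
    intro c F seen hcm hfuel hF ⟨u0, hu0F, hu0⟩ hseen
    rw [bLoop]
    by_cases hdk : (c : Int) ≤ k
    · rw [if_pos hdk]
      by_cases hany : F.any (fun u => (u.2 : Int) - (u.1 : Int) + (c : Int) ≤ k) = true
      · -- some interval fits the remaining budget: return True, and indeed m ≤ k
        rw [if_pos hany]
        obtain ⟨u, huF, hle⟩ := List.any_eq_true.mp hany
        simp only [decide_eq_true_eq] at hle
        obtain ⟨_, hge⟩ := hF u huF
        have hmk : m ≤ k := by
          by_cases hlt : u.1 < u.2
          · have hs := dSpec_span cs (u.2 - u.1) u.1 u.2 le_rfl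
            have : ((u.2 - u.1 : Nat) : Int) = (u.2 : Int) - u.1 := by push_cast; omega
            omega
          · have h0 : dSpec cs u.1 u.2 = 0 := dSpec_le cs (by omega)
            omega
        simp [hmk]
      · -- no interval fits yet; in particular the witness has not collapsed, so c < m
        have hcmeq : (c : Int) ≠ m := by
          intro hceq
          apply hany
          rw [List.any_eq_true]
          refine ⟨u0, hu0F, ?_⟩
          have hterm : u0.2 ≤ u0.1 := by
            have h0 : dSpec cs u0.1 u0.2 = 0 := by omega
            exact (shrunk_zero_iff cs u0 (hF u0 hu0F).1).mp h0
          simp only [decide_eq_true_eq]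
          have : (u0.2 : Int) - (u0.1 : Int) ≤ 0 := by omega
          omega
        have hclt : (c : Int) < m := lt_of_le_of_ne hcm hcmeq
        rw [if_neg hany]
        obtain ⟨hmono, hsync, hsub, hcover⟩ :=
          bStep_fold cs seen F ([], seen) (by simp)
        -- facts about expanded states
        have hchild : ∀ p ∈ F, Shrunk cs p → p.1 < p.2 →
            dSpec cs p.1 p.2 =
              1 + min (dSpec cs (p.1 + 1) p.2) (dSpec cs p.1 (p.2 - 1)) := by
          intro p _ hsh hlt
          have hne : ¬ cs.getD p.1 ' ' = cs.getD p.2 ' ' := fun hc => hsh ⟨hlt, hc⟩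
          rw [dSpec.eq_1, dif_pos hlt, if_neg hne]
        have hFbound : ∀ v ∈ (bStep cs F seen).1,
            Shrunk cs v ∧ m ≤ dSpec cs v.1 v.2 + ((c : Int) + 1) := by
          intro v hv
          rcases hsub v hv with hv1 | ⟨p, hpF, hc⟩
          · simp at hv1
          · obtain ⟨hsh, hge⟩ := hF p hpF
            have hlt : p.1 < p.2 := by
              by_contra hle
              rw [dSpec_le cs (by omega)] at hge; omega
            have hrec := hchild p hpF hsh hlt
            rcases hc with rfl | rfl
            · exact ⟨bShrink_shrunk cs _ _, by rw [bShrink_dSpec]; omega⟩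
            · exact ⟨bShrink_shrunk cs _ _, by rw [bShrink_dSpec]; omega⟩
        have hseen' : ∀ v ∈ (bStep cs F seen).2,
            m ≤ dSpec cs v.1 v.2 + ((c : Int) + 1) := by
          intro v hv
          rcases (hsync v).mp hv with hv1 | hv1
          · have := hseen v hv1; omega
          · exact (hFbound v hv1).2
        -- the witness survives: its best child is new (not yet seen)
        have hwit : ∃ v ∈ (bStep cs F seen).1, dSpec cs v.1 v.2 + ((c : Int) + 1) = m := by
          have hsh0 := (hF u0 hu0F).1
          have hlt0 : u0.1 < u0.2 := by
            by_contra hle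
            rw [dSpec_le cs (by omega)] at hu0; omega
          have hrec := hchild u0 hu0F hsh0 hlt0
          have hnn1 := dSpec_nonneg cs (u0.2 - (u0.1 + 1)) (u0.1 + 1) u0.2 le_rfl
          have hnn2 := dSpec_nonneg cs (u0.2 - 1 - u0.1) u0.1 (u0.2 - 1) le_rfl
          obtain ⟨hc1, hc2⟩ := hcover u0 hu0F
          by_cases hmin : dSpec cs (u0.1 + 1) u0.2 ≤ dSpec cs u0.1 (u0.2 - 1)
          · have hval : dSpec cs (bShrink cs (u0.1 + 1) u0.2).1 (bShrink cs (u0.1 + 1) u0.2).2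
                + ((c : Int) + 1) = m := by rw [bShrink_dSpec]; omega
            rcases hc1 with h | h
            · exact ⟨_, h, hval⟩
            · exfalso; have := hseen _ h; rw [bShrink_dSpec] at this; omega
          · have hval : dSpec cs (bShrink cs u0.1 (u0.2 - 1)).1 (bShrink cs u0.1 (u0.2 - 1)).2
                + ((c : Int) + 1) = m := by rw [bShrink_dSpec]; omega
            rcases hc2 with h | h
            · exact ⟨_, h, hval⟩
            · exfalso; have := hseen _ h; rw [bShrink_dSpec] at this; omega
        have := ih (c + 1) (bStep cs F seen).1 (bStep cs F seen).2
          (by push_cast; omega) (by push_cast at hfuel ⊢; omega)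
          (by intro u hu; have := hFbound u hu; push_cast; exact ⟨this.1, by omega⟩)
          (by obtain ⟨v, hv, hval⟩ := hwit; exact ⟨v, hv, by push_cast; omega⟩)
          (by intro v hv; have := hseen' v hv; push_cast; omega)
        push_cast at this ⊢
        exact this
    · rw [if_neg hdk]
      have : ¬ m ≤ k := by omega
      simp [this]

lemma b_eval (cs : List Char) (hne : cs ≠ []) (k : Int) :
    (let n := cs.length
     let start := bShrink cs 0 (n - 1)
     bLoop cs k [start] [start] 0 (n + 1)) =
    decide (dSpec cs 0 (cs.length - 1) ≤ k) := by
  have hn : 0 < cs.length := List.length_pos_iff.mpr hne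
  have hnn := dSpec_nonneg cs (cs.length - 1) 0 (cs.length - 1) (by omega)
  have hspan := dSpec_span cs (cs.length - 1) 0 (cs.length - 1) (by omega)
  have hdm : dSpec cs (bShrink cs 0 (cs.length - 1)).1 (bShrink cs 0 (cs.length - 1)).2 =
      dSpec cs 0 (cs.length - 1) := bShrink_dSpec cs 0 (cs.length - 1)
  have h := bLoop_spec cs k (dSpec cs 0 (cs.length - 1)) (cs.length + 1) 0
    [bShrink cs 0 (cs.length - 1)] [bShrink cs 0 (cs.length - 1)]
    (by push_cast; omega)
    (by push_cast at hspan ⊢; omega)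
    (by intro u hu; rcases List.mem_singleton.mp hu with rfl
        exact ⟨bShrink_shrunk cs _ _, by rw [hdm]; omega⟩)
    (⟨bShrink cs 0 (cs.length - 1), List.mem_singleton.mpr rfl, by rw [hdm]; omega⟩)
    (by intro v hv; rcases List.mem_singleton.mp hv with rfl; rw [hdm]; omega)
  simpa using h

-- ===== VERDICT (by name: the statement is the Claim_ definition above) =====
theorem isValidPalindromeIdeal_spec : Claim_equal_isValidPalindromeIdeal := by
  intro s k _ hpre
  unfold Spec_isValidPalindromeIdeal isValidPalindromeIdeal isValidPalindromeIdeal_alt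
  rw [a_eval s.toList hpre k, b_eval s.toList hpre k]
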